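-- pv_equiv track=rewrite | github.com/jamie-jjd/110_spring_ids | exam_at_home/3/cycle.py | MinCycle
-- ===== SOURCE A (Python) =====
-- def MinCycle (adj):
--     min_cycle_length = len(adj) + 1
--     for s in range(len(adj)):
--         stack, distance = [], [0] * len(adj)
--         stack.append([s, 0])
--         while len(stack):
--             u, i = stack.pop()
--             if i != len(adj[u]):
--                 stack.append([u, i + 1])
--                 v = adj[u][i]
--                 if distance[v]:
--                     cycle_length = distance[u] + 1 - distance[v]
--                     if cycle_length < min_cycle_length: min_cycle_length = cycle_length
--                 else:
--                     distance[v] = distance[u] + 1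
--                     stack.append([v, 0])
--             else:
--                 distance[u] = 0
--     return min_cycle_length if min_cycle_length != len(adj) + 1 else 0
-- ===== SOURCE B (Python) =====
-- def MinCycle(adj):
--     n = len(adj)
--     best = n + 1
--
--     def dfs(u, distance):
--         nonlocal best
--         for v in adj[u]:
--             if distance[v]:
--                 c = distance[u] + 1 - distance[v]
--                 if c < best:
--                     best = c
--             else:
--                 distance[v] = distance[u] + 1
--                 dfs(v, distance)
--         distance[u] = 0
--
--     for s in range(n):
--         dfs(s, [0] * n)
--     return best if best != n + 1 else 0
-- ===== Notes on version B (the rewrite author's own statement) =====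
-- stated objective: simpler
-- what changed: A's explicit-stack DFS with [vertex, edge-index] frames is re-decomposed as a plain recursive dfs(u) helper that loops over adj[u] and recurses, visiting edges in the same order and resetting distances at the same moments.
import Mathlib
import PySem

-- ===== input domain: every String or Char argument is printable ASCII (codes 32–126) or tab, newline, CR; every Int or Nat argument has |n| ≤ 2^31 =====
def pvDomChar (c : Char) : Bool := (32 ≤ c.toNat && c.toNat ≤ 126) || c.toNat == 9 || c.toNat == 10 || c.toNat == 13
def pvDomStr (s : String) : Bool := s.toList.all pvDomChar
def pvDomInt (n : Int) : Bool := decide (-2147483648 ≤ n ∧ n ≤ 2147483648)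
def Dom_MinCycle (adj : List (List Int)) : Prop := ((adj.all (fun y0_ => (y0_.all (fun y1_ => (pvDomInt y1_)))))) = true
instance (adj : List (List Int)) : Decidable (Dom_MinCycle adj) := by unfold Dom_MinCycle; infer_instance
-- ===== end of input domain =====

-- B rewrites A's explicit-stack DFS as a plain recursive dfs helper (simpler decomposition, same traversal
-- order and cost); equivalence is proved on adjacency lists whose labels are in range (A raises otherwise).

-- shared Python-exact indexing abbreviations (both Pythons read adj[u], distance[v] the same way)
def pvRow (adj : List (List Int)) (u : Int) : List Int := PySem.List.pyGetD adj u []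
def pvD (xs : List Int) (i : Int) : Int := PySem.List.pyGetD xs i 0

-- ===== PORT A =====
-- totality fuel for A's while loop (a guard only: proved sufficient below, never reached on Pre_ inputs)
def pvM (adj : List (List Int)) : Nat := (adj.map List.length).sum

def pvFuel (M : Nat) : Nat → Nat
  | 0 => 0
  | f + 1 => 1 + M * (1 + pvFuel M f)

def pvLoopA (adj : List (List Int)) : Nat → List (Int × Int) → List Int → Int → Option (List Int × Int)
  | _, [], dist, m => some (dist, m)
  | 0, _ :: _, _, _ => none
  | f + 1, (u, i) :: rest, dist, m =>
    if i ≠ ((pvRow adj u).length : Int) then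
      let v := pvD (pvRow adj u) i
      if pvD dist v ≠ 0 then
        pvLoopA adj f ((u, i + 1) :: rest) dist
          (let c := pvD dist u + 1 - pvD dist v; if c < m then c else m)
      else
        pvLoopA adj f ((v, 0) :: (u, i + 1) :: rest) (PySem.List.pySetD dist v (pvD dist u + 1)) m
    else
      pvLoopA adj f rest (PySem.List.pySetD dist u 0) m

def MinCycle (adj : List (List Int)) : Int :=
  let n := adj.length
  let m :=
    (PySem.List.pyRange 0 (n : Int) 1).foldl (fun m s =>
      match pvLoopA adj (pvFuel (pvM adj) (n + 1)) [(s, 0)] (List.replicate n 0) m with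
      | some (_, m') => m'
      | none => m) ((n : Int) + 1)
  if m ≠ (n : Int) + 1 then m else 0

-- ===== PORT B =====
def pvDfsGo (adj : List (List Int)) (rec : Int → List Int → Int → Option (List Int × Int)) (u : Int) :
    List Int → List Int → Int → Option (List Int × Int)
  | [], dist, m => some (PySem.List.pySetD dist u 0, m)
  | v :: vs, dist, m =>
    if pvD dist v ≠ 0 then
      pvDfsGo adj rec u vs dist (let c := pvD dist u + 1 - pvD dist v; if c < m then c else m)
    else
      match rec v (PySem.List.pySetD dist v (pvD dist u + 1)) m with
      | none => none
      | some (d2, m2) => pvDfsGo adj rec u vs d2 m2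

-- recursion-depth fuel (a guard only: depth bound n+1 is proved sufficient below)
def pvDfsB (adj : List (List Int)) : Nat → Int → List Int → Int → Option (List Int × Int)
  | 0, _, _, _ => none
  | f + 1, u, dist, m => pvDfsGo adj (pvDfsB adj f) u (pvRow adj u) dist m

def MinCycle_alt (adj : List (List Int)) : Int :=
  let n := adj.length
  let m :=
    (PySem.List.pyRange 0 (n : Int) 1).foldl (fun m s =>
      match pvDfsB adj (n + 1) s (List.replicate n 0) m with
      | some (_, m') => m'
      | none => m) ((n : Int) + 1)
  if m ≠ (n : Int) + 1 then m else 0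

-- ===== PRECONDITION & SPEC =====
-- Pre_ restricts to well-formed adjacency lists: every label v satisfies -n ≤ v < n, exactly the inputs
-- on which Python's indexing distance[v] does not raise IndexError (negative in-range labels wrap
-- identically in A and B and are kept inside Pre_).
def Pre_MinCycle (adj : List (List Int)) : Prop :=
  ∀ l ∈ adj, ∀ v ∈ l, -(adj.length : Int) ≤ v ∧ v < adj.length
instance (adj : List (List Int)) : Decidable (Pre_MinCycle adj) := by unfold Pre_MinCycle; infer_instance

def pvWitness_MinCycle : List (List Int) := [[1], [0]]

def Spec_MinCycle (adj : List (List Int)) (out : Int) : Prop := out = MinCycle_alt adj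
instance (adj : List (List Int)) (out : Int) : Decidable (Spec_MinCycle adj out) := by unfold Spec_MinCycle; infer_instance

-- ===== CLAIM (what is proved, stated in full; the proofs are below) =====
def Claim_equal_MinCycle : Prop := ∀ (adj : List (List Int)), Dom_MinCycle adj → Pre_MinCycle adj → Spec_MinCycle adj (MinCycle adj)

-- ===== LEMMAS AND PROOFS =====

-- Python index normalisation: for -n ≤ i < n, xs[i] is xs[pvIx n i]
def pvIx (n : Nat) (i : Int) : Nat := if 0 ≤ i then i.toNat else n - (-i).toNat

lemma pvIx_lt (n : Nat) (i : Int) (_h1 : -(n : Int) ≤ i) (h2 : i < n) (hn : 0 < n) : pvIx n i < n := by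
  unfold pvIx; split <;> omega

lemma pvIdx?_eq (n : Nat) (i : Int) (h1 : -(n : Int) ≤ i) (h2 : i < n) :
    PySem.List.pyIdx? n i = some (pvIx n i) := by
  simp only [PySem.List.pyIdx?, pvIx]
  split <;> simp

lemma pvGetD_norm {α : Type} (xs : List α) (d : α) (i : Int)
    (h1 : -(xs.length : Int) ≤ i) (h2 : i < xs.length) :
    PySem.List.pyGetD xs i d = xs.getD (pvIx xs.length i) d := by
  have hn : 0 < xs.length := by omega
  simp only [PySem.List.pyGetD, PySem.List.pyGet?, pvIdx?_eq _ _ h1 h2, Option.bind_some]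
  rw [List.getElem?_eq_getElem (pvIx_lt _ _ h1 h2 hn)]
  rw [List.getD_eq_getElem _ _ (pvIx_lt _ _ h1 h2 hn)]
  rfl

lemma pvSetD_norm {α : Type} (xs : List α) (x : α) (i : Int)
    (h1 : -(xs.length : Int) ≤ i) (h2 : i < xs.length) :
    PySem.List.pySetD xs i x = xs.set (pvIx xs.length i) x := by
  simp only [PySem.List.pySetD, PySem.List.pySet?, pvIdx?_eq _ _ h1 h2, Option.map_some, Option.getD_some]

lemma pvRow_len_le (adj : List (List Int)) (u : Int) : (pvRow adj u).length ≤ pvM adj := by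
  unfold pvRow pvM PySem.List.pyGetD PySem.List.pyGet?
  cases h : PySem.List.pyIdx? adj.length u with
  | none => simp
  | some k =>
    simp only [Option.bind_some]
    cases hk : adj[k]? with
    | none => simp
    | some l =>
      simp only [Option.getD_some]
      exact List.le_sum_of_mem (List.mem_map_of_mem (List.mem_of_getElem? hk))

lemma pvCount_set (dist : List Int) (i : Nat) (x : Int) (hi : i < dist.length)
    (h0 : dist[i] = 0) (hx : x ≠ 0) : (dist.set i x).count 0 + 1 = dist.count 0 := by
  induction dist generalizing i with
  | nil => simp at hi
  | cons a l ih =>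
    cases i with
    | zero =>
      simp at h0; subst h0
      simp [List.set, hx]
    | succ j =>
      simp at hi h0
      simp [List.set, List.count_cons]
      have := ih j hi h0
      omega

lemma pvD_norm (xs : List Int) (i : Int) (h1 : -(xs.length : Int) ≤ i) (h2 : i < xs.length) :
    pvD xs i = xs.getD (pvIx xs.length i) 0 := pvGetD_norm xs 0 i h1 h2

lemma pvRow_mem (adj : List (List Int)) (v : Int)
    (h1 : -(adj.length : Int) ≤ v) (h2 : v < adj.length) : pvRow adj v ∈ adj := by
  unfold pvRow
  rw [pvGetD_norm adj [] v h1 h2, List.getD_eq_getElem _ _ (pvIx_lt _ _ h1 h2 (by omega))]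
  exact List.getElem_mem _

-- fuel sufficiency for B's recursion (depth n+1 always suffices on Pre_ inputs),
-- plus the restore property: dfs(u) returns distance with only u's entry cleared
lemma pvSuff (adj : List (List Int))
    (hPre : ∀ l ∈ adj, ∀ v ∈ l, -(adj.length : Int) ≤ v ∧ v < adj.length) :
    ∀ (f : Nat) (vs : List Int) (u : Int) (dist : List Int) (m : Int),
      dist.length = adj.length →
      (∀ x ∈ dist, 0 ≤ x) →
      -(adj.length : Int) ≤ u → u < adj.length →
      (∀ v ∈ vs, -(adj.length : Int) ≤ v ∧ v < adj.length) →
      dist.count 0 ≤ f →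
      ∃ m', pvDfsGo adj (pvDfsB adj f) u vs dist m = some (PySem.List.pySetD dist u 0, m') := by
  intro f
  induction f with
  | zero =>
    intro vs
    induction vs with
    | nil => intro u dist m _ _ _ _ _ _; exact ⟨m, rfl⟩
    | cons v vs ih =>
      intro u dist m hlen hnn hu1 hu2 hvs hcnt
      have hv := hvs v (by simp)
      have h1 : -(dist.length : Int) ≤ v := by omega
      have h2 : v < (dist.length : Int) := by omega
      have hixlt : pvIx dist.length v < dist.length := pvIx_lt _ _ h1 h2 (by omega)
      have hcond : pvD dist v ≠ 0 := by
        rw [pvD_norm dist v h1 h2, List.getD_eq_getElem _ _ hixlt]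
        intro hz
        have : (0 : Int) ∈ dist := hz ▸ List.getElem_mem hixlt
        have := List.count_pos_iff.mpr this
        omega
      simp only [pvDfsGo]
      rw [if_pos hcond]
      exact ih u dist _ hlen hnn hu1 hu2 (fun w hw => hvs w (by simp [hw])) hcnt
  | succ f ihf =>
    intro vs
    induction vs with
    | nil => intro u dist m _ _ _ _ _ _; exact ⟨m, rfl⟩
    | cons v vs ih =>
      intro u dist m hlen hnn hu1 hu2 hvs hcnt
      have hv := hvs v (by simp)
      have h1 : -(dist.length : Int) ≤ v := by omega
      have h2 : v < (dist.length : Int) := by omega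
      have hixlt : pvIx dist.length v < dist.length := pvIx_lt _ _ h1 h2 (by omega)
      have hu1' : -(dist.length : Int) ≤ u := by omega
      have hu2' : u < (dist.length : Int) := by omega
      have hvs' : ∀ w ∈ vs, -(adj.length : Int) ≤ w ∧ w < adj.length := fun w hw => hvs w (by simp [hw])
      by_cases hz : dist[pvIx dist.length v]'hixlt = 0
      · -- tree edge: recurse into v with fuel f, then continue the loop on the restored distance
        have hcond : ¬ pvD dist v ≠ 0 := by
          rw [pvD_norm dist v h1 h2, List.getD_eq_getElem _ _ hixlt]; simp [hz]
        have hdu : 0 ≤ pvD dist u := by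
          rw [pvD_norm dist u hu1' hu2', List.getD_eq_getElem _ _ (pvIx_lt _ _ hu1' hu2' (by omega))]
          exact hnn _ (List.getElem_mem _)
        have hset : PySem.List.pySetD dist v (pvD dist u + 1) =
            dist.set (pvIx dist.length v) (pvD dist u + 1) := pvSetD_norm dist _ v h1 h2
        have hcnt2 : (dist.set (pvIx dist.length v) (pvD dist u + 1)).count 0 + 1 = dist.count 0 :=
          pvCount_set dist _ _ hixlt hz (by omega)
        have hlen2 : (dist.set (pvIx dist.length v) (pvD dist u + 1)).length = adj.length := by
          rw [List.length_set]; exact hlen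
        have hnn2 : ∀ x ∈ dist.set (pvIx dist.length v) (pvD dist u + 1), 0 ≤ x := by
          intro x hx
          rcases List.mem_or_eq_of_mem_set hx with hx' | hx'
          · exact hnn x hx'
          · omega
        have hrowv : ∀ w ∈ pvRow adj v, -(adj.length : Int) ≤ w ∧ w < adj.length :=
          fun w hw => hPre _ (pvRow_mem adj v (by omega) (by omega)) w hw
        obtain ⟨m2, hm2⟩ := ihf (pvRow adj v) v (dist.set (pvIx dist.length v) (pvD dist u + 1)) m
          hlen2 hnn2 (by omega) (by omega) hrowv (by omega)
        have hrestore0 : dist.set (pvIx dist.length v) 0 = dist := by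
          conv_lhs => rw [← hz]
          exact List.set_getElem_self hixlt
        have hrestore : PySem.List.pySetD (dist.set (pvIx dist.length v) (pvD dist u + 1)) v 0 = dist := by
          rw [pvSetD_norm _ 0 v (by rw [List.length_set]; exact h1) (by rw [List.length_set]; exact h2)]
          rw [List.length_set, List.set_set]
          exact hrestore0
        have hm2' : pvDfsGo adj (pvDfsB adj f) v (pvRow adj v)
            (PySem.List.pySetD dist v (pvD dist u + 1)) m = some (dist, m2) := by
          rw [hset, hm2, hrestore]
        obtain ⟨m3, hm3⟩ := ih u dist m2 hlen hnn hu1 hu2 hvs' hcnt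
        refine ⟨m3, ?_⟩
        simp only [pvDfsGo]
        rw [if_neg hcond]
        simp only [pvDfsB]
        rw [hm2']
        exact hm3
      · -- back edge
        have hcond : pvD dist v ≠ 0 := by
          rw [pvD_norm dist v h1 h2, List.getD_eq_getElem _ _ hixlt]; exact hz
        simp only [pvDfsGo]
        rw [if_pos hcond]
        exact ih u dist _ hlen hnn hu1 hu2 hvs' hcnt

lemma pvSimNil (adj : List (List Int)) (f : Nat) (u : Int) (iN : Nat) (dist : List Int) (m : Int)
    (dist' : List Int) (m' : Int) (rest : List (Int × Int))
    (hile : iN ≤ (pvRow adj u).length)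
    (hdrop : ([] : List Int) = (pvRow adj u).drop iN)
    (hrun : pvDfsGo adj (pvDfsB adj f) u [] dist m = some (dist', m')) :
    ∃ fA, fA ≤ 1 + List.length ([] : List Int) * (1 + pvFuel (pvM adj) f) ∧
      ∀ g, pvLoopA adj (fA + g) ((u, (iN : Int)) :: rest) dist m = pvLoopA adj g rest dist' m' := by
  have hlen : iN = (pvRow adj u).length := by
    have := List.drop_eq_nil_iff.mp hdrop.symm
    omega
  simp only [pvDfsGo, Option.some.injEq, Prod.mk.injEq] at hrun
  refine ⟨1, by simp, ?_⟩
  intro g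
  rw [show 1 + g = g + 1 from by omega]
  simp only [pvLoopA]
  rw [if_neg (by rw [hlen]; simp)]
  rw [hrun.1, hrun.2]

lemma pvSimCons (adj : List (List Int)) (u : Int) (iN : Nat) (v : Int) (vs : List Int)
    (hile : iN ≤ (pvRow adj u).length)
    (hdrop : v :: vs = (pvRow adj u).drop iN) :
    iN < (pvRow adj u).length ∧
    pvD (pvRow adj u) (iN : Int) = v ∧
    ((iN : Int) ≠ ((pvRow adj u).length : Int)) ∧
    (pvRow adj u)[iN]? = some v ∧
    vs = (pvRow adj u).drop (iN + 1) := by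
  have hlt : iN < (pvRow adj u).length := by
    by_contra h
    rw [List.drop_eq_nil_of_le (by omega)] at hdrop
    simp at hdrop
  rw [List.drop_eq_getElem_cons hlt] at hdrop
  obtain ⟨h1, h2⟩ := List.cons.inj hdrop
  refine ⟨hlt, ?_, by omega, ?_, h2⟩
  · simp only [pvD, PySem.List.pyGetD_natCast]
    rw [List.getD_eq_getElem _ _ hlt, h1]
  · rw [List.getElem?_eq_getElem hlt, h1]

-- simulation: A's explicit stack consumes the frame (u, i) exactly as B's recursive call does
lemma pvSim (adj : List (List Int)) :
    ∀ (f : Nat) (vs : List Int) (u : Int) (iN : Nat) (dist : List Int) (m : Int)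
      (dist' : List Int) (m' : Int) (rest : List (Int × Int)),
      iN ≤ (pvRow adj u).length →
      vs = (pvRow adj u).drop iN →
      pvDfsGo adj (pvDfsB adj f) u vs dist m = some (dist', m') →
      ∃ fA, fA ≤ 1 + vs.length * (1 + pvFuel (pvM adj) f) ∧
        ∀ g, pvLoopA adj (fA + g) ((u, (iN : Int)) :: rest) dist m = pvLoopA adj g rest dist' m' := by
  intro f
  induction f with
  | zero =>
    intro vs
    induction vs with
    | nil =>
      intro u iN dist m dist' m' rest hile hdrop hrun
      exact pvSimNil adj 0 u iN dist m dist' m' rest hile hdrop hrun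
    | cons v vs ih =>
      intro u iN dist m dist' m' rest hile hdrop hrun
      obtain ⟨hlt, hvA, hne, hgv, hvs⟩ := pvSimCons adj u iN v vs hile hdrop
      by_cases hdv : pvD dist v ≠ 0
      · -- back edge
        simp only [pvDfsGo] at hrun
        rw [if_pos hdv] at hrun
        obtain ⟨fA2, hb2, hs2⟩ := ih u (iN + 1) dist _ dist' m' rest (by omega) hvs hrun
        refine ⟨fA2 + 1, ?_, ?_⟩
        · simp only [List.length_cons]
          rw [show (vs.length + 1) * (1 + pvFuel (pvM adj) 0) =
              vs.length * (1 + pvFuel (pvM adj) 0) + (1 + pvFuel (pvM adj) 0) from by ring]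
          linarith
        · intro g
          rw [show fA2 + 1 + g = (fA2 + g) + 1 from by omega]
          simp only [pvLoopA]
          rw [if_pos hne, hvA, if_pos hdv, show (iN : Int) + 1 = ((iN + 1 : Nat) : Int) from by push_cast; ring]
          exact hs2 g
      · -- tree edge: fuel 0 subcall is none, contradicting hrun
        simp only [pvDfsGo] at hrun
        rw [if_neg hdv] at hrun
        simp only [pvDfsB] at hrun
        exact absurd hrun (by simp)
  | succ f ihf =>
    intro vs
    induction vs with
    | nil =>
      intro u iN dist m dist' m' rest hile hdrop hrun
      exact pvSimNil adj (f + 1) u iN dist m dist' m' rest hile hdrop hrun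
    | cons v vs ih =>
      intro u iN dist m dist' m' rest hile hdrop hrun
      obtain ⟨hlt, hvA, hne, hgv, hvs⟩ := pvSimCons adj u iN v vs hile hdrop
      by_cases hdv : pvD dist v ≠ 0
      · -- back edge
        simp only [pvDfsGo] at hrun
        rw [if_pos hdv] at hrun
        obtain ⟨fA2, hb2, hs2⟩ := ih u (iN + 1) dist _ dist' m' rest (by omega) hvs hrun
        refine ⟨fA2 + 1, ?_, ?_⟩
        · simp only [List.length_cons]
          rw [show (vs.length + 1) * (1 + pvFuel (pvM adj) (f + 1)) =
              vs.length * (1 + pvFuel (pvM adj) (f + 1)) + (1 + pvFuel (pvM adj) (f + 1)) from by ring]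
          linarith
        · intro g
          rw [show fA2 + 1 + g = (fA2 + g) + 1 from by omega]
          simp only [pvLoopA]
          rw [if_pos hne, hvA, if_pos hdv, show (iN : Int) + 1 = ((iN + 1 : Nat) : Int) from by push_cast; ring]
          exact hs2 g
      · -- tree edge
        simp only [pvDfsGo] at hrun
        rw [if_neg hdv] at hrun
        rcases hsub : pvDfsB adj (f + 1) v (PySem.List.pySetD dist v (pvD dist u + 1)) m with _ | ⟨d2, m2⟩
        · rw [hsub] at hrun; exact absurd hrun (by simp)
        · rw [hsub] at hrun
          have hsub' : pvDfsGo adj (pvDfsB adj f) v (pvRow adj v)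
              (PySem.List.pySetD dist v (pvD dist u + 1)) m = some (d2, m2) := by
            rw [← hsub]; rfl
          obtain ⟨fA1, hb1, hs1⟩ := ihf (pvRow adj v) v 0
            (PySem.List.pySetD dist v (pvD dist u + 1)) m d2 m2
            (((u, ((iN + 1 : Nat) : Int))) :: rest) (Nat.zero_le _) (by simp) hsub'
          obtain ⟨fA2, hb2, hs2⟩ := ih u (iN + 1) d2 m2 dist' m' rest (by omega) hvs hrun
          refine ⟨1 + fA1 + fA2, ?_, ?_⟩
          · have hrl : (pvRow adj v).length ≤ pvM adj := pvRow_len_le adj v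
            have hA1 : fA1 ≤ pvFuel (pvM adj) (f + 1) := by
              calc fA1 ≤ 1 + (pvRow adj v).length * (1 + pvFuel (pvM adj) f) := hb1
                _ ≤ 1 + pvM adj * (1 + pvFuel (pvM adj) f) :=
                    Nat.add_le_add_left (Nat.mul_le_mul_right _ hrl) 1
                _ = pvFuel (pvM adj) (f + 1) := rfl
            simp only [List.length_cons]
            rw [show (vs.length + 1) * (1 + pvFuel (pvM adj) (f + 1)) =
                vs.length * (1 + pvFuel (pvM adj) (f + 1)) + (1 + pvFuel (pvM adj) (f + 1)) from by ring]
            linarith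
          · intro g
            rw [show 1 + fA1 + fA2 + g = (fA1 + (fA2 + g)) + 1 from by omega]
            simp only [pvLoopA]
            rw [if_pos hne, hvA, if_neg hdv, show (iN : Int) + 1 = ((iN + 1 : Nat) : Int) from by push_cast; ring]
            have := hs1 (fA2 + g)
            rw [Nat.cast_zero] at this
            rw [this]
            exact hs2 g

-- per-source agreement of the two loop bodies
lemma pvSource (adj : List (List Int))
    (hPre : ∀ l ∈ adj, ∀ v ∈ l, -(adj.length : Int) ≤ v ∧ v < adj.length)
    (s : Int) (hs1 : 0 ≤ s) (hs2 : s < adj.length) (m : Int) :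
    (match pvLoopA adj (pvFuel (pvM adj) (adj.length + 1)) [(s, 0)] (List.replicate adj.length 0) m with
      | some (_, m') => m'
      | none => m) =
    (match pvDfsB adj (adj.length + 1) s (List.replicate adj.length 0) m with
      | some (_, m') => m'
      | none => m) := by
  have hlen0 : (List.replicate adj.length (0 : Int)).length = adj.length := by simp
  have hnn0 : ∀ x ∈ List.replicate adj.length (0 : Int), 0 ≤ x := by
    intro x hx; rw [List.eq_of_mem_replicate hx]
  have hrow : ∀ w ∈ pvRow adj s, -(adj.length : Int) ≤ w ∧ w < adj.length :=
    fun w hw => hPre _ (pvRow_mem adj s (by omega) hs2) w hw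
  obtain ⟨m', hB⟩ := pvSuff adj hPre adj.length (pvRow adj s) s
    (List.replicate adj.length (0 : Int)) m hlen0 hnn0 (by omega) (by omega) hrow
    (by rw [List.count_replicate_self])
  obtain ⟨fA, hbound, hsim⟩ := pvSim adj adj.length (pvRow adj s) s 0
    (List.replicate adj.length (0 : Int)) m
    (PySem.List.pySetD (List.replicate adj.length (0 : Int)) s 0) m' []
    (Nat.zero_le _) (by simp) hB
  have hFA : fA ≤ pvFuel (pvM adj) (adj.length + 1) := by
    calc fA ≤ 1 + (pvRow adj s).length * (1 + pvFuel (pvM adj) adj.length) := hbound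
      _ ≤ 1 + pvM adj * (1 + pvFuel (pvM adj) adj.length) :=
          Nat.add_le_add_left (Nat.mul_le_mul_right _ (pvRow_len_le adj s)) 1
      _ = pvFuel (pvM adj) (adj.length + 1) := rfl
  have hA := hsim (pvFuel (pvM adj) (adj.length + 1) - fA)
  rw [Nat.add_sub_cancel' hFA, Nat.cast_zero] at hA
  have hB' : pvDfsB adj (adj.length + 1) s (List.replicate adj.length 0) m =
      some (PySem.List.pySetD (List.replicate adj.length (0 : Int)) s 0, m') := by
    simp only [pvDfsB]; exact hB
  rw [hA, hB']
  simp only [pvLoopA]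

-- ===== VERDICT (by name: the statement is the Claim_ definition above) =====
theorem MinCycle_spec : Claim_equal_MinCycle := by
  intro adj _ hPre
  unfold Spec_MinCycle MinCycle MinCycle_alt
  have hfold :
      (PySem.List.pyRange 0 (adj.length : Int) 1).foldl (fun m s =>
        match pvLoopA adj (pvFuel (pvM adj) (adj.length + 1)) [(s, 0)] (List.replicate adj.length 0) m with
        | some (_, m') => m'
        | none => m) ((adj.length : Int) + 1) =
      (PySem.List.pyRange 0 (adj.length : Int) 1).foldl (fun m s =>
        match pvDfsB adj (adj.length + 1) s (List.replicate adj.length 0) m with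
        | some (_, m') => m'
        | none => m) ((adj.length : Int) + 1) := by
    apply PySem.List.foldl_congr_mem
    intro m s hmem
    have hs := (PySem.List.mem_pyRange_one).1 hmem
    exact pvSource adj hPre s hs.1 hs.2 m
  simp only [hfold]
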